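-- pv_equiv track=rewrite | github.com/frozenfrank/watersort | watersort.py | analyzeCounterDictionary
-- ===== SOURCE A (Python) =====
-- from collections import deque, defaultdict
--
-- def analyzeCounterDictionary(dict: defaultdict[int]) -> tuple[int, int, int, int]: # (min, max, mode, total)
--   minKey = min(dict.keys())
--   maxKey = max(dict.keys())
--   totalOccurrences = sum(dict.values())
--
--   # Compute mode
--   modeKey = None
--   modeKeyOccurrences = 0
--   for key, occurrences in dict.items():
--     if occurrences > modeKeyOccurrences:
--       modeKey = key
--       modeKeyOccurrences = occurrences
--
--   return (minKey, maxKey, modeKey, totalOccurrences)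
-- ===== SOURCE B (Python) =====
-- def analyzeCounterDictionary(dict):
--   # Single pass over the items, maintaining all four statistics at once.
--   minKey = None
--   maxKey = None
--   modeKey = None
--   modeKeyOccurrences = 0
--   totalOccurrences = 0
--   for key, occurrences in dict.items():
--     if minKey is None or key < minKey:
--       minKey = key
--     if maxKey is None or key > maxKey:
--       maxKey = key
--     totalOccurrences += occurrences
--     if occurrences > modeKeyOccurrences:
--       modeKey = key
--       modeKeyOccurrences = occurrences
--   return (minKey, maxKey, modeKey, totalOccurrences)
-- ===== Notes on version B (the rewrite author's own statement) =====
-- stated objective: alternative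
-- what changed: Replaces A's four separate passes (min, max, sum, mode loop) with one fold over the items that maintains all four statistics simultaneously.
-- outside the precondition, e.g. on analyzeCounterDictionary({1: 0}): A returns (1, 1, None, 0), B returns (1, 1, None, 0)
import Mathlib
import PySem

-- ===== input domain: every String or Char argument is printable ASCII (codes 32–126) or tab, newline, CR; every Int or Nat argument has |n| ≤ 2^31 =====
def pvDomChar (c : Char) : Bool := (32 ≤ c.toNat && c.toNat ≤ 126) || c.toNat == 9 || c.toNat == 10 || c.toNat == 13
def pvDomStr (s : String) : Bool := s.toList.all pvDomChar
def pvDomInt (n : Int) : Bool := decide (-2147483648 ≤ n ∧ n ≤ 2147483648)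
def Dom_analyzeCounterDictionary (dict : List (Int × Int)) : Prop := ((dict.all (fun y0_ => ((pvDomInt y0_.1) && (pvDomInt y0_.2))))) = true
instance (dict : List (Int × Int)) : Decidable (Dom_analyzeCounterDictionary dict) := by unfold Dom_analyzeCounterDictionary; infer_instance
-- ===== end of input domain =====

-- B fuses A's four passes into one fold over the items; return values proved equal on Pre_.

-- ===== PORT A =====
-- A's mode loop: state (modeKey, modeKeyOccurrences), modeKey starts as None
def pvModeStep (s : Option Int × Int) (kv : Int × Int) : Option Int × Int :=
  if kv.2 > s.2 then (some kv.1, kv.2) else s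

def analyzeCounterDictionary (dict : List (Int × Int)) : Int × Int × Int × Int :=
  -- min()/max() raise ValueError on an empty dict (min? = none there): excluded by Pre_; .getD 0 is unreached inside Pre_
  let minKey := (PySem.List.min? (dict.map Prod.fst) (fun x => x)).getD 0
  let maxKey := (PySem.List.max? (dict.map Prod.fst) (fun x => x)).getD 0
  let totalOccurrences := (dict.map Prod.snd).foldl (· + ·) 0
  let mode := dict.foldl pvModeStep (none, 0)
  -- modeKey is still None when no occurrence is > 0: excluded by Pre_; .getD 0 is unreached inside Pre_
  (minKey, maxKey, mode.1.getD 0, totalOccurrences)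

-- ===== PORT B =====
-- B's single-pass state: (minKey, maxKey, modeKey, modeKeyOccurrences, totalOccurrences)
def pvAltStep (s : Option Int × Option Int × Option Int × Int × Int) (kv : Int × Int) :
    Option Int × Option Int × Option Int × Int × Int :=
  let mn := match s.1 with | none => some kv.1 | some m => if kv.1 < m then some kv.1 else some m
  let mx := match s.2.1 with | none => some kv.1 | some m => if kv.1 > m then some kv.1 else some m
  let (mk, mc) := if kv.2 > s.2.2.2.1 then (some kv.1, kv.2) else (s.2.2.1, s.2.2.2.1)
  (mn, mx, mk, mc, s.2.2.2.2 + kv.2)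

def analyzeCounterDictionary_alt (dict : List (Int × Int)) : Int × Int × Int × Int :=
  let s := dict.foldl pvAltStep (none, none, none, 0, 0)
  -- the three Options are all some inside Pre_ (None outside it); .getD 0 is unreached inside Pre_
  (s.1.getD 0, s.2.1.getD 0, s.2.2.1.getD 0, s.2.2.2.2)

-- ===== PRECONDITION & SPEC =====
-- Pre_ excludes the empty dict, where A raises ValueError (min() of no keys), and non-empty dicts whose
-- values are all ≤ 0, where A's modeKey stays None — not an int of the declared return type.
def Pre_analyzeCounterDictionary (dict : List (Int × Int)) : Prop :=
  dict ≠ [] ∧ ∃ p ∈ dict, 0 < p.2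
instance (dict : List (Int × Int)) : Decidable (Pre_analyzeCounterDictionary dict) := by
  unfold Pre_analyzeCounterDictionary; infer_instance

def pvWitness_analyzeCounterDictionary : (List (Int × Int)) := [(2, 3), (-1, 1)]

def Spec_analyzeCounterDictionary (dict : List (Int × Int)) (out : Int × Int × Int × Int) : Prop := out = analyzeCounterDictionary_alt dict
instance (dict : List (Int × Int)) (out : Int × Int × Int × Int) : Decidable (Spec_analyzeCounterDictionary dict out) := by unfold Spec_analyzeCounterDictionary; infer_instance

-- ===== CLAIM (what is proved, stated in full; the proofs are below) =====
def Claim_equal_analyzeCounterDictionary : Prop := ∀ (dict : List (Int × Int)), Dom_analyzeCounterDictionary dict → Pre_analyzeCounterDictionary dict → Spec_analyzeCounterDictionary dict (analyzeCounterDictionary dict)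

-- ===== LEMMAS AND PROOFS =====

-- B's fold splits into four independent componentwise folds
theorem alt_fold_split (dict : List (Int × Int)) (mn mx mk : Option Int) (mc tot : Int) :
    dict.foldl pvAltStep (mn, mx, mk, mc, tot) =
      (dict.foldl (fun a kv => match a with
          | none => some kv.1 | some m => if kv.1 < m then some kv.1 else some m) mn,
       dict.foldl (fun a kv => match a with
          | none => some kv.1 | some m => if kv.1 > m then some kv.1 else some m) mx,
       (dict.foldl pvModeStep (mk, mc)).1,
       (dict.foldl pvModeStep (mk, mc)).2,
       dict.foldl (fun t kv => t + kv.2) tot) := by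
  induction dict generalizing mn mx mk mc tot with
  | nil => rfl
  | cons p t ih =>
      simp only [List.foldl_cons, pvAltStep, pvModeStep]
      by_cases h : p.2 > mc <;> simp [h, ih]

theorem optmin_fold (t : List (Int × Int)) (m : Int) :
    t.foldl (fun a kv => match a with
        | none => some kv.1 | some m => if kv.1 < m then some kv.1 else some m) (some m) =
      some ((t.map Prod.fst).foldl min m) := by
  induction t generalizing m with
  | nil => rfl
  | cons p t ih =>
      have hstep : (if p.1 < m then some p.1 else (some m : Option Int)) = some (min m p.1) := by
        rcases lt_or_ge p.1 m with h | h
        · simp [h, min_eq_right h.le]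
        · simp [not_lt.mpr h, min_eq_left h]
      simp only [List.foldl_cons, List.map_cons, hstep, ih]

theorem optmax_fold (t : List (Int × Int)) (m : Int) :
    t.foldl (fun a kv => match a with
        | none => some kv.1 | some m => if kv.1 > m then some kv.1 else some m) (some m) =
      some ((t.map Prod.fst).foldl max m) := by
  induction t generalizing m with
  | nil => rfl
  | cons p t ih =>
      have hstep : (if p.1 > m then some p.1 else (some m : Option Int)) = some (max m p.1) := by
        rcases lt_or_ge m p.1 with h | h
        · simp [h, max_eq_right h.le]
        · simp [not_lt.mpr h, max_eq_left h]
      simp only [List.foldl_cons, List.map_cons, hstep, ih]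

theorem total_fold (t : List (Int × Int)) (a : Int) :
    t.foldl (fun t kv => t + kv.2) a = (t.map Prod.snd).foldl (· + ·) a := by
  induction t generalizing a with
  | nil => rfl
  | cons p t ih => simp [List.foldl_cons, ih]

-- ===== VERDICT (by name: the statement is the Claim_ definition above) =====
theorem analyzeCounterDictionary_spec : Claim_equal_analyzeCounterDictionary := by
  intro dict _ hpre
  obtain ⟨hne, _⟩ := hpre
  unfold Spec_analyzeCounterDictionary analyzeCounterDictionary analyzeCounterDictionary_alt
  obtain ⟨p, t, rfl⟩ := List.exists_cons_of_ne_nil hne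
  simp only [List.foldl_cons, pvAltStep]
  rw [alt_fold_split, optmin_fold, optmax_fold, total_fold]
  simp [List.map_cons, PySem.List.min?_id_cons, PySem.List.max?_id_cons, pvModeStep]
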